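-- pv_equiv track=rewrite | github.com/pypi-data/pypi-mirror-41 | packages/mhelper/mhelper-1.0.1.69.tar.gz/mhelper-1.0.1.69/mhelper/array_helper.py | lagged_iterate
-- ===== SOURCE A (Python) =====
-- from typing import List, Optional, Iterator, Tuple, Dict, Iterable, Union, TypeVar, Callable
--
-- T = TypeVar( "T" )
--
-- def lagged_iterate( sequence: Iterable[Optional[T]], head = False, tail = False ) -> Iterator[Tuple[Optional[T], Optional[T]]]:
--     """
--     Iterates over all adjacent pairs in the sequence.
--
--     :param sequence:        Sequence to iterate over `(0, 1, 2, 3, ..., n)`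
--     :param head:            Include the head element `(None, 0)`. (off by default)
--     :param tail:            Include the tail element `(n, None)`. (off by default)
--     :return:                The iteration: `(0,1), (1,2), (2,3), (...,...), (n-1,n)`
--
--                                 `head`  `tail`      `result when sequence = (1)`     `result when sequence = (1, 2, 3)`
--                                 False   False                                                   (1, 2), (2, 3)
--                                 True    False       (None, 1)                        (None, 1), (1, 2), (2, 3)
--                                 True    True        (None, 1) (1, None)              (None, 1), (1, 2), (2, 3), (3, None)
--                                 False   True                  (1, None)                         (1, 2), (2, 3), (3, None)
--
--     """
--     has_any = 0
--     previous = None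
--
--     for current in sequence:
--         if has_any:
--             yield previous, current
--         elif head:
--             yield None, current
--
--         has_any += 1
--         previous = current
--
--     if tail:
--         yield previous, None
-- ===== SOURCE B (Python) =====
-- def lagged_iterate(sequence, head=False, tail=False):
--     items = list(sequence)
--     if head and items:
--         yield None, items[0]
--     yield from zip(items, items[1:])
--     if tail:
--         yield (items[-1] if items else None), None
-- ===== Notes on version B (the rewrite author's own statement) =====
-- stated objective: simpler
-- what changed: Replaces the has_any/previous running-state loop by materializing the sequence once and zipping it with its own tail, with head/tail sentinels handled as separate prologue/epilogue yields.
import Mathlib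
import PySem

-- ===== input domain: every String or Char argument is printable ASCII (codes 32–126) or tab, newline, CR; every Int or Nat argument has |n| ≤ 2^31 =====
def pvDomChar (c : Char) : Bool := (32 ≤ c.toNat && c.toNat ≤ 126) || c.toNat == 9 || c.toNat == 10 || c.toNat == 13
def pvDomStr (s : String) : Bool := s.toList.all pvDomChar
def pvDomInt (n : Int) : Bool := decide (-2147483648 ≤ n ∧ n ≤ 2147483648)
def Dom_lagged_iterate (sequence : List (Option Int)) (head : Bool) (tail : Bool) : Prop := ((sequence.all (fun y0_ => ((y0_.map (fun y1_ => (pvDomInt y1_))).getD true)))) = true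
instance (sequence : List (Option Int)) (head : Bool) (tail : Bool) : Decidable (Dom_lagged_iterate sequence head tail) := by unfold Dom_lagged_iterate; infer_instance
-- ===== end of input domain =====

-- B replaces A's has_any/previous running-state loop by one zip of the list with its tail
-- plus separate head/tail sentinel entries (objective: simpler).


-- ===== PORT A =====
-- loop state: (has_any, previous, yielded so far)
def lagged_iterate (sequence : List (Option Int)) (head : Bool) (tail : Bool) : List (Option Int × Option Int) :=
  let st := sequence.foldl
    (fun (st : Int × Option Int × List (Option Int × Option Int)) current =>
      (st.1 + 1, current,
        if st.1 ≠ 0 then st.2.2 ++ [(st.2.1, current)]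
        else if head then st.2.2 ++ [(none, current)]
        else st.2.2))
    (0, none, [])
  if tail then st.2.2 ++ [(st.2.1, none)] else st.2.2

-- ===== PORT B =====
def lagged_iterate_alt (sequence : List (Option Int)) (head : Bool) (tail : Bool) : List (Option Int × Option Int) :=
  let items := sequence
  (if head && !items.isEmpty then [((none : Option Int), items.headI)] else [])
  ++ items.zip items.tail
  ++ (if tail then [(items.getLastD none, (none : Option Int))] else [])

-- ===== PRECONDITION & SPEC =====
def Spec_lagged_iterate (sequence : List (Option Int)) (head : Bool) (tail : Bool) (out : List (Option Int × Option Int)) : Prop := out = lagged_iterate_alt sequence head tail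
instance (sequence : List (Option Int)) (head : Bool) (tail : Bool) (out : List (Option Int × Option Int)) : Decidable (Spec_lagged_iterate sequence head tail out) := by unfold Spec_lagged_iterate; infer_instance

-- ===== CLAIM (what is proved, stated in full; the proofs are below) =====
def Claim_equal_lagged_iterate : Prop := ∀ (sequence : List (Option Int)) (head : Bool) (tail : Bool), Dom_lagged_iterate sequence head tail → Spec_lagged_iterate sequence head tail (lagged_iterate sequence head tail)

-- ===== LEMMAS AND PROOFS =====

-- once has_any ≥ 1 the loop only appends adjacent pairs: closed form of the tail of the fold
theorem lagged_fold_inv (head : Bool) (xs : List (Option Int)) :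
    ∀ (k : Int), 1 ≤ k → ∀ (prev : Option Int) (acc : List (Option Int × Option Int)),
    xs.foldl
      (fun (st : Int × Option Int × List (Option Int × Option Int)) current =>
        (st.1 + 1, current,
          if st.1 ≠ 0 then st.2.2 ++ [(st.2.1, current)]
          else if head then st.2.2 ++ [(none, current)]
          else st.2.2))
      (k, prev, acc)
    = (k + xs.length, xs.getLastD prev, acc ++ (prev :: xs).zip xs) := by
  induction xs with
  | nil => intro k hk prev acc; simp
  | cons x xs ih =>
      intro k hk prev acc
      have hk0 : k ≠ 0 := by omega
      simp only [List.foldl_cons, if_pos hk0]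
      rw [ih (k + 1) (by omega)]
      simp only [Prod.mk.injEq, List.getLastD_cons, List.zip_cons_cons, List.length_cons,
        List.append_assoc, List.cons_append, List.singleton_append]
      refine ⟨?_, ?_, ?_⟩ <;> first | (push_cast; ring) | rfl | trivial

-- ===== VERDICT (by name: the statement is the Claim_ definition above) =====
theorem lagged_iterate_spec : Claim_equal_lagged_iterate := by
  intro sequence head tail _
  unfold Spec_lagged_iterate lagged_iterate lagged_iterate_alt
  cases sequence with
  | nil => cases head <;> cases tail <;> simp
  | cons x xs =>
      simp only [List.foldl_cons]
      have h0 : (0 : Int) ≠ 0 ↔ False := by simp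
      rw [show (if (0 : Int) ≠ 0 then ([] : List (Option Int × Option Int)) ++ [((none : Option Int), x)]
            else if head then ([] : List (Option Int × Option Int)) ++ [((none : Option Int), x)] else [])
          = (if head then [((none : Option Int), x)] else []) by simp]
      rw [show ((0 : Int) + 1) = 1 from by norm_num, lagged_fold_inv head xs 1 (by norm_num)]
      cases head <;> cases tail <;> simp
      all_goals
        cases xs with
        | nil => simp
        | cons y ys => simp [List.getLast?_eq_some_getLast (List.cons_ne_nil y ys)]
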